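-- pv_equiv track=rewrite | github.com/vishaal314/myapp | services/data_collector.py | _get_date_range
-- ===== SOURCE A (Python) =====
-- from typing import Dict, List, Any, Optional
--
-- def _get_date_range(data_entries: List[Dict]) -> Dict[str, str]:
--     """Get the date range of collected data."""
--     if not data_entries:
--         return {'start': None, 'end': None}
--
--     timestamps = [entry.get('timestamp') for entry in data_entries if entry.get('timestamp')]
--     if not timestamps:
--         return {'start': None, 'end': None}
--
--     return {
--         'start': min(timestamps),
--         'end': max(timestamps)
--     }
-- ===== SOURCE B (Python) =====
-- def _get_date_range(data_entries):
--     """Get the date range of collected data (single fused pass)."""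
--     start = None
--     end = None
--     for entry in data_entries:
--         ts = entry.get('timestamp')
--         if not ts:
--             continue
--         if start is None:
--             start = ts
--             end = ts
--         else:
--             if ts < start:
--                 start = ts
--             if ts > end:
--                 end = ts
--     return {'start': start, 'end': end}
-- ===== Notes on version B (the rewrite author's own statement) =====
-- stated objective: alternative
-- what changed: Replaces the filtering comprehension plus separate min() and max() passes (three traversals and an intermediate list) with one fused loop maintaining running start/end accumulators, the empty/all-falsy cases falling out of the None initialisation.
import Mathlib
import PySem

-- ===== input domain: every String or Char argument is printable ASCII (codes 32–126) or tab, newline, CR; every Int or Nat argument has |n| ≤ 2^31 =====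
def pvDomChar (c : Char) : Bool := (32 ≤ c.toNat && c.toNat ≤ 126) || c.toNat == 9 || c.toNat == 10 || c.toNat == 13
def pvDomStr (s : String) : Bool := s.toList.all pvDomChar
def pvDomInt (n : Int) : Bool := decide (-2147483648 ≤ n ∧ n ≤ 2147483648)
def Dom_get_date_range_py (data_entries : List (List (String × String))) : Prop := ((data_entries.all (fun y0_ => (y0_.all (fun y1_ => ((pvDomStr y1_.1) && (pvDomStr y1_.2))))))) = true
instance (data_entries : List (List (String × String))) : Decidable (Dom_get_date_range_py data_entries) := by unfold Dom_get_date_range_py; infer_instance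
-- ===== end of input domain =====

-- B replaces the comprehension + min() + max() passes of A with one fused loop
-- carrying running start/end accumulators (objective: alternative decomposition).

-- ===== PORT A =====
-- entry.get('timestamp'): first-match lookup in the association list
def aGetTs (entry : List (String × String)) : Option String :=
  (entry.find? (fun p => p.1 == "timestamp")).map Prod.snd

def get_date_range_py (data_entries : List (List (String × String))) : List (String × Option String) :=
  if data_entries = [] then [("start", none), ("end", none)]
  else
    let timestamps := data_entries.filterMap (fun entry =>
      match aGetTs entry with
      | some ts => if ts ≠ "" then some ts else none
      | none => none)
    if timestamps = [] then [("start", none), ("end", none)]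
    else [("start", PySem.List.min? timestamps (fun y => y)),
          ("end",   PySem.List.max? timestamps (fun y => y))]

-- ===== PORT B =====
-- one loop iteration of Source B: state is the pair (start, end)
def bStep (acc : Option String × Option String) (entry : List (String × String)) :
    Option String × Option String :=
  match (entry.find? (fun p => p.1 == "timestamp")).map Prod.snd with
  | none => acc
  | some ts =>
    if ts = "" then acc
    else
      match acc with
      | (none, _) => (some ts, some ts)
      | (some s, e) =>
        ((if ts < s then some ts else some s),
         (match e with
          | some en => if ts > en then some ts else some en
          | none => some ts))

def get_date_range_py_alt (data_entries : List (List (String × String))) : List (String × Option String) :=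
  let r := data_entries.foldl bStep (none, none)
  [("start", r.1), ("end", r.2)]

-- ===== PRECONDITION & SPEC =====
def Spec_get_date_range_py (data_entries : List (List (String × String))) (out : List (String × Option String)) : Prop := out = get_date_range_py_alt data_entries
instance (data_entries : List (List (String × String))) (out : List (String × Option String)) : Decidable (Spec_get_date_range_py data_entries out) := by unfold Spec_get_date_range_py; infer_instance

-- ===== CLAIM (what is proved, stated in full; the proofs are below) =====
def Claim_equal_get_date_range_py : Prop := ∀ (data_entries : List (List (String × String))), Dom_get_date_range_py data_entries → Spec_get_date_range_py data_entries (get_date_range_py data_entries)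

-- ===== LEMMAS AND PROOFS =====

-- the filter/map A applies entrywise, shared shape of both proofs
def tsOf (entry : List (String × String)) : Option String :=
  match aGetTs entry with
  | some ts => if ts ≠ "" then some ts else none
  | none => none

-- step of B restricted to the kept timestamps
def tStep (acc : Option String × Option String) (ts : String) : Option String × Option String :=
  match acc with
  | (none, _) => (some ts, some ts)
  | (some s, e) =>
    ((if ts < s then some ts else some s),
     (match e with
      | some en => if ts > en then some ts else some en
      | none => some ts))

theorem bStep_eq_tsOf (acc : Option String × Option String) (entry : List (String × String)) :
    bStep acc entry = match tsOf entry with | some ts => tStep acc ts | none => acc := by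
  unfold bStep tsOf tStep aGetTs
  cases (entry.find? (fun p => p.1 == "timestamp")).map Prod.snd with
  | none => rfl
  | some ts =>
    by_cases h : ts = "" <;> simp [h]

theorem foldl_tStep_some (t : List String) (s e : String) :
    t.foldl tStep (some s, some e) = (some (t.foldl min s), some (t.foldl max e)) := by
  induction t generalizing s e with
  | nil => rfl
  | cons x t ih =>
    simp only [List.foldl_cons]
    have hmin : (if x < s then some x else some s) = some (min s x) := by
      split_ifs with h
      · rw [min_eq_right h.le]
      · rw [min_eq_left (not_lt.mp h)]
    have hmax : (if x > e then some x else some e) = some (max e x) := by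
      split_ifs with h
      · rw [max_eq_right h.le]
      · rw [max_eq_left (not_lt.mp h)]
    have h1 : tStep (some s, some e) x = (some (min s x), some (max e x)) := by
      simp only [tStep, hmin, hmax]
    rw [h1, ih]

theorem foldl_tStep_char (t : List String) :
    t.foldl tStep (none, none) =
      (PySem.List.min? t (fun y => y), PySem.List.max? t (fun y => y)) := by
  cases t with
  | nil => rfl
  | cons x t =>
    simp only [List.foldl_cons]
    have h0 : tStep (none, none) x = (some x, some x) := rfl
    rw [h0, foldl_tStep_some, PySem.List.min?_id_cons, PySem.List.max?_id_cons]

theorem foldl_bStep_eq (de : List (List (String × String)))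
    (init : Option String × Option String) :
    de.foldl bStep init = (de.filterMap tsOf).foldl tStep init := by
  induction de generalizing init with
  | nil => rfl
  | cons x t ih =>
    simp only [List.foldl_cons, List.filterMap_cons]
    rw [bStep_eq_tsOf]
    cases h : tsOf x <;> simp [ih]

-- ===== VERDICT (by name: the statement is the Claim_ definition above) =====
theorem get_date_range_py_spec : Claim_equal_get_date_range_py := by
  intro de _
  unfold Spec_get_date_range_py get_date_range_py get_date_range_py_alt
  rw [foldl_bStep_eq, foldl_tStep_char]
  by_cases hde : de = []
  · subst hde; rfl
  · simp only [hde, if_false]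
    set ts := de.filterMap tsOf with hts
    have : (de.filterMap (fun entry =>
      match aGetTs entry with
      | some ts => if ts ≠ "" then some ts else none
      | none => none)) = ts := rfl
    rw [this]
    by_cases h : ts = []
    · simp [h, PySem.List.min?, PySem.List.max?]
    · simp [h]
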